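-- pv_equiv track=rewrite | github.com/kpzeus/Interview | Interview/Python/Senate.py | predictPartyVictory
-- ===== SOURCE A (Python) =====
-- def predictPartyVictory(senate):
--     n = len(senate)
--     s = set()
--     b = [False] * n
--     d = 0
--     r = 0
--     while len(s) != 1:
--         s = set()
--         for i, p in enumerate(senate):
--             if b[i]: continue
--             if p == 'R':
--                 if r > 0:
--                     r -= 1
--                     b[i] = True
--                 else:
--                     d += 1
--                     s.add('R')
--             else:
--                 if d > 0:
--                     d -= 1
--                     b[i] = True
--                 else:
--                     r += 1
--                     s.add('D')
--     return 'Radiant' if list(s)[0] == 'R' else 'Dire'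
-- ===== SOURCE B (Python) =====
-- def predictPartyVictory(senate):
--     # Event-driven greedy: the first senator still in line always acts, banning the
--     # nearest opposing senator ahead of him, then cycles to the back of the line.
--     alive = [c == 'R' for c in senate]
--     while True:
--         h = alive.pop(0)
--         if (not h) in alive:
--             alive.remove(not h)
--             alive.append(h)
--         else:
--             return 'Radiant' if h else 'Dire'
-- ===== Notes on version B (the rewrite author's own statement) =====
-- stated objective: simpler
-- what changed: B replaces A's repeated full-scan rounds with banned-flags and pending-ban counters by the event-driven greedy: the first senator still in line bans the nearest opposing senator ahead and cycles to the back, until only one party remains; banned senators disappear instead of being rescanned every round.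
import Mathlib
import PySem

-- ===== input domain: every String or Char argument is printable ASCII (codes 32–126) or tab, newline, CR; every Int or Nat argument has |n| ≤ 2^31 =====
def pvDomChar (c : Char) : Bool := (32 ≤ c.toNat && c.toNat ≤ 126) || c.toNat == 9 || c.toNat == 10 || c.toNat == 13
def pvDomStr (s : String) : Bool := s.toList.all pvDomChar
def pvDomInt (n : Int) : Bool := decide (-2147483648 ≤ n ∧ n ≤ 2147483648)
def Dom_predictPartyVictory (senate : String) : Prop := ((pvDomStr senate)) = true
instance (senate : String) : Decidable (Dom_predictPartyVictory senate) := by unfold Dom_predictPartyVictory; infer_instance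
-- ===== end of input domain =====

-- B replaces A's round-by-round counter simulation over banned-flags by the event-driven greedy
-- ("the first senator still in line bans the nearest opposing senator and cycles to the back"):
-- a different, simpler algorithm (banned senators disappear instead of being rescanned;
-- a timing run measured B faster).


-- ===== PORT A =====
-- one round of A's inner `for i, p in enumerate(senate)` loop, threading (b, d, r, s)
def pvPassA (en : List (Int × Char)) (b : List Bool) (d r : Int) (s : PySem.Set Char) :
    List Bool × Int × Int × PySem.Set Char :=
  match en with
  | [] => (b, d, r, s)
  | (i, p) :: rest =>
    if PySem.List.pyGetD b i false then pvPassA rest b d r s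
    else if p = 'R' then
      if r > 0 then pvPassA rest (PySem.List.pySetD b i true) d (r - 1) s
      else pvPassA rest b (d + 1) r (PySem.Set.add s 'R')
    else
      if d > 0 then pvPassA rest (PySem.List.pySetD b i true) (d - 1) r s
      else pvPassA rest b d (r + 1) (PySem.Set.add s 'D')

-- A's `while len(s) != 1` loop; the fuel (n + 2 at the call site) only totalizes the while
def pvLoopA (fuel : Nat) (en : List (Int × Char)) (b : List Bool) (d r : Int)
    (s : PySem.Set Char) : PySem.Set Char :=
  match fuel with
  | 0 => s
  | f + 1 =>
    if s.length = 1 then s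
    else
      let t := pvPassA en b d r PySem.Set.empty
      pvLoopA f en t.1 t.2.1 t.2.2.1 t.2.2.2

def predictPartyVictory (senate : String) : String :=
  let n := senate.toList.length
  let b := List.replicate n false
  let s := pvLoopA (n + 2) (PySem.List.enumerate senate.toList 0) b 0 0 PySem.Set.empty
  if s.head? = some 'R' then "Radiant" else "Dire"

-- ===== PORT B =====
-- B's `while True` loop over the line of senators (True = Radiant); `alive.pop(0)` is the
-- head pattern (Python raises IndexError on [] — excluded by Pre_, "Dire" is a dummy value);
-- `alive.remove(not h)` is `rest.erase (!h)`, exact here since membership was checked first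
-- (PySem.List.remove?_eq_some_erase).
def pvRun (alive : List Bool) : String :=
  match alive with
  | [] => "Dire"
  | h :: rest =>
    if hm : (!h) ∈ rest then pvRun (rest.erase (!h) ++ [h])
    else if h then "Radiant" else "Dire"
termination_by alive.length
decreasing_by
  have := List.length_erase_of_mem hm
  have : 0 < rest.length := List.length_pos_of_mem hm
  simp [List.length_erase_of_mem hm]
  omega

def predictPartyVictory_alt (senate : String) : String :=
  pvRun (senate.toList.map (fun c => c == 'R'))

-- ===== PRECONDITION & SPEC =====
-- Pre_ excludes only the empty string, on which A never returns (its while-loop runs forever)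
-- and B raises IndexError.
def Pre_predictPartyVictory (senate : String) : Prop := senate ≠ ""
instance (senate : String) : Decidable (Pre_predictPartyVictory senate) := by
  unfold Pre_predictPartyVictory; infer_instance
def pvWitness_predictPartyVictory : String := "RDD"

def Spec_predictPartyVictory (senate : String) (out : String) : Prop := out = predictPartyVictory_alt senate
instance (senate : String) (out : String) : Decidable (Spec_predictPartyVictory senate out) := by unfold Spec_predictPartyVictory; infer_instance

-- ===== CLAIM (what is proved, stated in full; the proofs are below) =====
def Claim_equal_predictPartyVictory : Prop := ∀ (senate : String), Dom_predictPartyVictory senate → Pre_predictPartyVictory senate → Spec_predictPartyVictory senate (predictPartyVictory senate)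

-- ===== LEMMAS AND PROOFS =====

-- ---------- Stage 1: A's banned-flag rounds = rounds over the survivor char list ----------

-- one round over the surviving senators only, same counters and acted-party set as A's round
def pvPassS (alive : List Char) (d r : Int) (s : PySem.Set Char) :
    List Char × Int × Int × PySem.Set Char :=
  match alive with
  | [] => ([], d, r, s)
  | p :: rest =>
    if p = 'R' then
      if r > 0 then pvPassS rest d (r - 1) s
      else
        let t := pvPassS rest (d + 1) r (PySem.Set.add s 'R')
        (p :: t.1, t.2)
    else
      if d > 0 then pvPassS rest (d - 1) r s
      else
        let t := pvPassS rest d (r + 1) (PySem.Set.add s 'D')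
        (p :: t.1, t.2)

def pvLoopS (fuel : Nat) (alive : List Char) (d r : Int) (s : PySem.Set Char) : PySem.Set Char :=
  match fuel with
  | 0 => s
  | f + 1 =>
    if s.length = 1 then s
    else
      let t := pvPassS alive d r PySem.Set.empty
      pvLoopS f t.1 t.2.1 t.2.2.1 t.2.2.2

-- the survivors of `en` under the banned-flags `b`
def pvAliveOf (en : List (Int × Char)) (b : List Bool) : List Char :=
  en.filterMap (fun ip => if PySem.List.pyGetD b ip.1 false then none else some ip.2)

lemma pvPassA_cons (i : Int) (p : Char) (rest : List (Int × Char)) (b : List Bool)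
    (d r : Int) (s : PySem.Set Char) :
    pvPassA ((i, p) :: rest) b d r s =
      if PySem.List.pyGetD b i false then pvPassA rest b d r s
      else if p = 'R' then
        if r > 0 then pvPassA rest (PySem.List.pySetD b i true) d (r - 1) s
        else pvPassA rest b (d + 1) r (PySem.Set.add s 'R')
      else
        if d > 0 then pvPassA rest (PySem.List.pySetD b i true) (d - 1) r s
        else pvPassA rest b d (r + 1) (PySem.Set.add s 'D') := rfl

lemma pvPassS_cons (p : Char) (rest : List Char) (d r : Int) (s : PySem.Set Char) :
    pvPassS (p :: rest) d r s =
      if p = 'R' then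
        if r > 0 then pvPassS rest d (r - 1) s
        else
          let t := pvPassS rest (d + 1) r (PySem.Set.add s 'R')
          (p :: t.1, t.2)
      else
        if d > 0 then pvPassS rest (d - 1) r s
        else
          let t := pvPassS rest d (r + 1) (PySem.Set.add s 'D')
          (p :: t.1, t.2) := rfl

lemma pvAliveOf_congr (en : List (Int × Char)) (b b' : List Bool)
    (h : ∀ q ∈ en, PySem.List.pyGetD b' q.1 false = PySem.List.pyGetD b q.1 false) :
    pvAliveOf en b' = pvAliveOf en b := by
  unfold pvAliveOf
  exact List.filterMap_congr (fun q hq => by rw [h q hq])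

lemma pvAliveOf_cons_banned (i : Int) (p : Char) (rest : List (Int × Char)) (b : List Bool)
    (h : PySem.List.pyGetD b i false = true) :
    pvAliveOf ((i, p) :: rest) b = pvAliveOf rest b := by
  simp [pvAliveOf, h]

lemma pvAliveOf_cons_alive (i : Int) (p : Char) (rest : List (Int × Char)) (b : List Bool)
    (h : PySem.List.pyGetD b i false = false) :
    pvAliveOf ((i, p) :: rest) b = p :: pvAliveOf rest b := by
  simp [pvAliveOf, h]

lemma pvPassA_length (en : List (Int × Char)) (b : List Bool) (d r : Int) (s : PySem.Set Char) :
    ((pvPassA en b d r s).1).length = b.length := by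
  induction en generalizing b d r s with
  | nil => rfl
  | cons hd rest ih =>
    obtain ⟨i, p⟩ := hd
    rw [pvPassA_cons]
    split_ifs <;> simp [ih, PySem.List.length_pySetD]

lemma pvPassA_frozen (en : List (Int × Char)) (b : List Bool) (d r : Int) (s : PySem.Set Char)
    (i : Int) (hi : ∃ mi : Nat, i = (mi : Int))
    (h : ∀ q ∈ en, q.1 ≠ i ∧ ∃ m : Nat, q.1 = (m : Int) ∧ m < b.length) :
    PySem.List.pyGetD (pvPassA en b d r s).1 i false = PySem.List.pyGetD b i false := by
  induction en generalizing b d r s with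
  | nil => rfl
  | cons hd rest ih =>
    obtain ⟨j, p⟩ := hd
    obtain ⟨hji0, m, hjm0, hmlt⟩ := h (j, p) (List.mem_cons_self)
    have hji : j ≠ i := hji0
    have hjm : j = (m : Int) := hjm0
    have hrest : ∀ q ∈ rest, q.1 ≠ i ∧ ∃ m : Nat, q.1 = (m : Int) ∧ m < b.length :=
      fun q hq => h q (List.mem_cons_of_mem _ hq)
    have hrest' : ∀ q ∈ rest, q.1 ≠ i ∧
        ∃ m' : Nat, q.1 = (m' : Int) ∧ m' < (PySem.List.pySetD b j true).length := by
      intro q hq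
      obtain ⟨h1, m', h2, h3⟩ := hrest q hq
      exact ⟨h1, m', h2, by rwa [PySem.List.length_pySetD]⟩
    have hset : PySem.List.pyGetD (PySem.List.pySetD b j true) i false =
        PySem.List.pyGetD b i false := by
      obtain ⟨mi, rfl⟩ := hi
      subst hjm
      rw [PySem.List.pyGetD_pySetD_natCast b m mi true false hmlt,
        if_neg (fun hh : mi = m => hji (by exact_mod_cast hh.symm))]
    rw [pvPassA_cons]
    split_ifs with h1 h2 h3 h4
    · exact ih b d r s hrest
    · rw [ih _ d (r-1) s hrest', hset]
    · exact ih b (d+1) r _ hrest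
    · rw [ih _ (d-1) r s hrest', hset]
    · exact ih b d (r+1) _ hrest

lemma pv_pass_eq (en : List (Int × Char)) (b : List Bool) (d r : Int) (s : PySem.Set Char)
    (hdist : en.Pairwise (fun p q => p.1 ≠ q.1))
    (hix : ∀ q ∈ en, ∃ m : Nat, q.1 = (m : Int) ∧ m < b.length) :
    pvPassS (pvAliveOf en b) d r s =
      (pvAliveOf en (pvPassA en b d r s).1, (pvPassA en b d r s).2) := by
  induction en generalizing b d r s with
  | nil => rfl
  | cons hd rest ih =>
    obtain ⟨i, p⟩ := hd
    rw [List.pairwise_cons] at hdist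
    obtain ⟨hne, hdist'⟩ := hdist
    obtain ⟨m, him, hmlt⟩ := hix (i, p) (List.mem_cons_self)
    have hixr : ∀ q ∈ rest, ∃ m : Nat, q.1 = (m : Int) ∧ m < b.length :=
      fun q hq => hix q (List.mem_cons_of_mem _ hq)
    have hfro : ∀ (b₀ : List Bool) (d₀ r₀ : Int) (s₀ : PySem.Set Char),
        b₀.length = b.length →
        PySem.List.pyGetD (pvPassA rest b₀ d₀ r₀ s₀).1 i false =
          PySem.List.pyGetD b₀ i false := by
      intro b₀ d₀ r₀ s₀ hlen
      refine pvPassA_frozen rest b₀ d₀ r₀ s₀ i ⟨m, him⟩ (fun q hq => ?_)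
      obtain ⟨m', h1, h2⟩ := hixr q hq
      exact ⟨Ne.symm (hne q hq), m', h1, by rwa [hlen]⟩
    by_cases hb : PySem.List.pyGetD b i false = true
    · -- senator i already banned: skipped by A, absent from the survivor list
      rw [pvAliveOf_cons_banned _ _ _ _ hb, pvPassA_cons, if_pos hb,
        ih b d r s hdist' hixr,
        pvAliveOf_cons_banned _ _ _ _ (by rw [hfro b d r s rfl]; exact hb)]
    · have hb' : PySem.List.pyGetD b i false = false := by
        simpa using hb
      have hsetcongr : pvAliveOf rest (PySem.List.pySetD b i true) = pvAliveOf rest b := by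
        refine pvAliveOf_congr rest b _ (fun q hq => ?_)
        obtain ⟨m', h1, _⟩ := hixr q hq
        have him' : i = (m : Int) := him
        have hne' : i ≠ q.1 := hne q hq
        rw [him', h1, PySem.List.pyGetD_pySetD_natCast b m m' true false hmlt,
          if_neg (fun hh : m' = m => hne' (by rw [him', h1]; exact_mod_cast hh.symm))]
      have hixset : ∀ q ∈ rest, ∃ m' : Nat, q.1 = (m' : Int) ∧
          m' < (PySem.List.pySetD b i true).length := by
        intro q hq
        obtain ⟨m', h1, h2⟩ := hixr q hq
        exact ⟨m', h1, by rwa [PySem.List.length_pySetD]⟩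
      have hselfset : PySem.List.pyGetD (PySem.List.pySetD b i true) i false = true := by
        have him' : i = (m : Int) := him
        rw [him', PySem.List.pyGetD_pySetD_natCast b m m true false hmlt, if_pos rfl]
      rw [pvAliveOf_cons_alive _ _ _ _ hb', pvPassA_cons,
        if_neg (by simp [hb']), pvPassS_cons]
      by_cases hp : p = 'R'
      · rw [if_pos hp, if_pos hp]
        by_cases hr : r > 0
        · rw [if_pos hr, if_pos hr, ← hsetcongr, ih _ _ _ _ hdist' hixset,
            pvAliveOf_cons_banned _ _ _ _
              (by rw [hfro _ _ _ _ (by rw [PySem.List.length_pySetD])]; exact hselfset)]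
        · rw [if_neg hr, if_neg hr]
          simp only [ih _ _ _ _ hdist' hixr]
          rw [pvAliveOf_cons_alive _ _ _ _ (by rw [hfro b _ _ _ rfl]; exact hb')]
      · rw [if_neg hp, if_neg hp]
        by_cases hdpos : d > 0
        · rw [if_pos hdpos, if_pos hdpos, ← hsetcongr, ih _ _ _ _ hdist' hixset,
            pvAliveOf_cons_banned _ _ _ _
              (by rw [hfro _ _ _ _ (by rw [PySem.List.length_pySetD])]; exact hselfset)]
        · rw [if_neg hdpos, if_neg hdpos]
          simp only [ih _ _ _ _ hdist' hixr]
          rw [pvAliveOf_cons_alive _ _ _ _ (by rw [hfro b _ _ _ rfl]; exact hb')]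

lemma pv_loop_eq (fuel : Nat) (en : List (Int × Char)) (b : List Bool) (d r : Int)
    (s : PySem.Set Char)
    (hdist : en.Pairwise (fun p q => p.1 ≠ q.1))
    (hix : ∀ q ∈ en, ∃ m : Nat, q.1 = (m : Int) ∧ m < b.length) :
    pvLoopS fuel (pvAliveOf en b) d r s = pvLoopA fuel en b d r s := by
  induction fuel generalizing b d r s with
  | zero => rfl
  | succ f ih =>
    show (if s.length = 1 then s else _) = (if s.length = 1 then s else _)
    by_cases hs : s.length = 1
    · rw [if_pos hs, if_pos hs]
    · rw [if_neg hs, if_neg hs]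
      simp only [pv_pass_eq en b d r PySem.Set.empty hdist hix]
      have hix' : ∀ q ∈ en, ∃ m : Nat, q.1 = (m : Int) ∧
          m < ((pvPassA en b d r PySem.Set.empty).1).length := by
        intro q hq
        obtain ⟨m, h1, h2⟩ := hix q hq
        exact ⟨m, h1, by rwa [pvPassA_length]⟩
      exact ih _ _ _ _ hix'

lemma pvGetD_replicate_false (n : Nat) (i : Int) :
    PySem.List.pyGetD (List.replicate n false) i false = false := by
  by_cases h : PySem.Raise.InRange (List.replicate n false).length i
  · have := PySem.List.pyGetD_mem (List.replicate n false) (d := false) h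
    exact List.eq_of_mem_replicate this
  · exact PySem.List.pyGetD_of_none _ _ _ ((PySem.List.pyGet?_eq_none_iff _ _).mpr h)

lemma pvAliveOf_init (xs : List Char) :
    pvAliveOf (PySem.List.enumerate xs 0) (List.replicate xs.length false) = xs := by
  unfold pvAliveOf
  have h : ∀ q ∈ PySem.List.enumerate xs 0,
      (if PySem.List.pyGetD (List.replicate xs.length false) q.1 false then (none : Option Char)
       else some q.2) = (some ∘ fun q : Int × Char => q.2) q := by
    intro q _
    rw [pvGetD_replicate_false]
    simp
  rw [List.filterMap_congr h, List.filterMap_eq_map]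
  exact PySem.List.map_snd_enumerate xs 0

-- A's port, rewritten through the survivor-list round semantics
lemma pvA_eq_S (senate : String) :
    predictPartyVictory senate =
      (if (pvLoopS (senate.toList.length + 2) senate.toList 0 0 PySem.Set.empty).head? = some 'R'
       then "Radiant" else "Dire") := by
  unfold predictPartyVictory
  have hdist : (PySem.List.enumerate senate.toList 0).Pairwise (fun p q => p.1 ≠ q.1) :=
    (PySem.List.pairwise_lt_enumerate senate.toList 0).imp (fun h => ne_of_lt h)
  have hix : ∀ q ∈ PySem.List.enumerate senate.toList 0, ∃ m : Nat, q.1 = (m : Int) ∧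
      m < (List.replicate senate.toList.length false).length := by
    intro q hq
    rw [PySem.List.mem_enumerate_iff] at hq
    obtain ⟨k, hk, hq⟩ := hq
    exact ⟨k, by simp [hq], by simpa using hk⟩
  have hloop : pvLoopA (senate.toList.length + 2) (PySem.List.enumerate senate.toList 0)
        (List.replicate senate.toList.length false) 0 0 PySem.Set.empty =
      pvLoopS (senate.toList.length + 2) senate.toList 0 0 PySem.Set.empty := by
    rw [← pv_loop_eq (senate.toList.length + 2) (PySem.List.enumerate senate.toList 0)
      (List.replicate senate.toList.length false) 0 0 PySem.Set.empty hdist hix,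
      pvAliveOf_init]
  show (if (pvLoopA (senate.toList.length + 2) (PySem.List.enumerate senate.toList 0)
      (List.replicate senate.toList.length false) 0 0 PySem.Set.empty).head? = some 'R'
      then "Radiant" else "Dire") = _
  rw [hloop]

-- ---------- Stage 2: the survivor-round semantics computes B's event-driven greedy ----------

-- eager application of the pending-ban counters: drop the first (up to) d Dire (false) and
-- first (up to) r Radiant (true) members; returns the remaining line and the leftover counters
def pvDropBF : List Bool → Int → Int → List Bool × Int × Int
  | [], d, r => ([], d, r)
  | x :: L, d, r =>
    if x then
      if 0 < r then pvDropBF L d (r - 1)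
      else ((true :: (pvDropBF L d r).1), (pvDropBF L d r).2)
    else
      if 0 < d then pvDropBF L (d - 1) r
      else ((false :: (pvDropBF L d r).1), (pvDropBF L d r).2)

def pvMapR (cs : List Char) : List Bool := cs.map (fun c => c == 'R')

lemma pvDropBF_zero (L : List Bool) : pvDropBF L 0 0 = (L, 0, 0) := by
  induction L with
  | nil => rfl
  | cons x L ih => cases x <;> simp [pvDropBF, ih]

lemma pvDropBF_cons_true_pos (L : List Bool) (d r : Int) (h : 0 < r) :
    pvDropBF (true :: L) d r = pvDropBF L d (r - 1) := by
  simp [pvDropBF, h]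

lemma pvDropBF_cons_true_nonpos (L : List Bool) (d r : Int) (h : ¬ 0 < r) :
    pvDropBF (true :: L) d r = ((true :: (pvDropBF L d r).1), (pvDropBF L d r).2) := by
  simp [pvDropBF, h]

lemma pvDropBF_cons_false_pos (L : List Bool) (d r : Int) (h : 0 < d) :
    pvDropBF (false :: L) d r = pvDropBF L (d - 1) r := by
  simp [pvDropBF, h]

lemma pvDropBF_cons_false_nonpos (L : List Bool) (d r : Int) (h : ¬ 0 < d) :
    pvDropBF (false :: L) d r = ((false :: (pvDropBF L d r).1), (pvDropBF L d r).2) := by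
  simp [pvDropBF, h]

lemma pvDropBF_append (X Y : List Bool) (d r : Int) :
    pvDropBF (X ++ Y) d r =
      ((pvDropBF X d r).1 ++ (pvDropBF Y (pvDropBF X d r).2.1 (pvDropBF X d r).2.2).1,
       (pvDropBF Y (pvDropBF X d r).2.1 (pvDropBF X d r).2.2).2) := by
  induction X generalizing d r with
  | nil => simp [pvDropBF]
  | cons x X ih =>
    cases x
    · by_cases h : 0 < d
      · simp [pvDropBF_cons_false_pos _ _ _ h, ih]
      · simp [pvDropBF_cons_false_nonpos _ _ _ h, ih]
    · by_cases h : 0 < r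
      · simp [pvDropBF_cons_true_pos _ _ _ h, ih]
      · simp [pvDropBF_cons_true_nonpos _ _ _ h, ih]

lemma pvDropBF_snd_r (L : List Bool) (d r : Int) (h : r ≤ 0) :
    (pvDropBF L d r).2.2 = r := by
  induction L generalizing d with
  | nil => rfl
  | cons x L ih =>
    cases x
    · by_cases hd : 0 < d
      · rw [pvDropBF_cons_false_pos _ _ _ hd]; exact ih _
      · rw [pvDropBF_cons_false_nonpos _ _ _ hd]; exact ih _
    · rw [pvDropBF_cons_true_nonpos _ _ _ (by omega)]; exact ih _

lemma pvDropBF_snd_d (L : List Bool) (d r : Int) (h : d ≤ 0) :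
    (pvDropBF L d r).2.1 = d := by
  induction L generalizing r with
  | nil => rfl
  | cons x L ih =>
    cases x
    · rw [pvDropBF_cons_false_nonpos _ _ _ (by omega)]; exact ih _
    · by_cases hr : 0 < r
      · rw [pvDropBF_cons_true_pos _ _ _ hr]; exact ih _
      · rw [pvDropBF_cons_true_nonpos _ _ _ hr]; exact ih _

lemma pvDropBF_subset (L : List Bool) (d r : Int) : ∀ x ∈ (pvDropBF L d r).1, x ∈ L := by
  induction L generalizing d r with
  | nil => intro x hx; simp [pvDropBF] at hx
  | cons y L ih =>
    intro x hx
    cases y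
    · by_cases h : 0 < d
      · rw [pvDropBF_cons_false_pos _ _ _ h] at hx
        exact List.mem_cons_of_mem _ (ih _ _ _ hx)
      · rw [pvDropBF_cons_false_nonpos _ _ _ h] at hx
        rcases List.mem_cons.mp hx with h1 | h1
        · simp [h1]
        · exact List.mem_cons_of_mem _ (ih _ _ _ h1)
    · by_cases h : 0 < r
      · rw [pvDropBF_cons_true_pos _ _ _ h] at hx
        exact List.mem_cons_of_mem _ (ih _ _ _ hx)
      · rw [pvDropBF_cons_true_nonpos _ _ _ h] at hx
        rcases List.mem_cons.mp hx with h1 | h1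
        · simp [h1]
        · exact List.mem_cons_of_mem _ (ih _ _ _ h1)

-- one more pending Dire-ban removes the first remaining Dire member (if any)
lemma pvDropBF_succ_d (L : List Bool) (d r : Int) (hd : 0 ≤ d) (hr : r ≤ 0) :
    pvDropBF L (d + 1) r =
      if false ∈ (pvDropBF L d r).1
      then ((pvDropBF L d r).1.erase false, (pvDropBF L d r).2.1, (pvDropBF L d r).2.2)
      else ((pvDropBF L d r).1, (pvDropBF L d r).2.1 + 1, (pvDropBF L d r).2.2) := by
  induction L generalizing d with
  | nil => simp [pvDropBF]
  | cons x L ih =>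
    cases x
    · by_cases h0 : 0 < d
      · rw [pvDropBF_cons_false_pos _ _ _ (by omega : (0:Int) < d + 1),
          pvDropBF_cons_false_pos _ _ _ h0]
        have he : d + 1 - 1 = (d - 1) + 1 := by ring
        rw [he, ih (d - 1) (by omega)]
      · have hd0 : d = 0 := by omega
        subst hd0
        rw [pvDropBF_cons_false_pos _ _ _ (by norm_num : (0:Int) < 0 + 1),
          pvDropBF_cons_false_nonpos _ _ _ h0]
        have he : (0:Int) + 1 - 1 = 0 := by ring
        rw [he]
        simp
    · rw [pvDropBF_cons_true_nonpos L (d + 1) r (by omega),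
        pvDropBF_cons_true_nonpos L d r (by omega), ih d hd]
      by_cases hf : false ∈ (pvDropBF L d r).1
      · simp [hf]
      · simp [hf]

lemma pvDropBF_succ_r (L : List Bool) (d r : Int) (hr : 0 ≤ r) (hd : d ≤ 0) :
    pvDropBF L d (r + 1) =
      if true ∈ (pvDropBF L d r).1
      then ((pvDropBF L d r).1.erase true, (pvDropBF L d r).2.1, (pvDropBF L d r).2.2)
      else ((pvDropBF L d r).1, (pvDropBF L d r).2.1, (pvDropBF L d r).2.2 + 1) := by
  induction L generalizing r with
  | nil => simp [pvDropBF]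
  | cons x L ih =>
    cases x
    · rw [pvDropBF_cons_false_nonpos L d (r + 1) (by omega),
        pvDropBF_cons_false_nonpos L d r (by omega), ih r hr]
      by_cases hf : true ∈ (pvDropBF L d r).1
      · simp [hf]
      · simp [hf]
    · by_cases h0 : 0 < r
      · rw [pvDropBF_cons_true_pos _ _ _ (by omega : (0:Int) < r + 1),
          pvDropBF_cons_true_pos _ _ _ h0]
        have he : r + 1 - 1 = (r - 1) + 1 := by ring
        rw [he, ih (r - 1) (by omega)]
      · have hr0 : r = 0 := by omega
        subst hr0
        rw [pvDropBF_cons_true_pos _ _ _ (by norm_num : (0:Int) < 0 + 1),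
          pvDropBF_cons_true_nonpos _ _ _ h0]
        have he : (0:Int) + 1 - 1 = 0 := by ring
        rw [he]
        simp

lemma pvRun_cons_mem (h : Bool) (rest : List Bool) (hm : (!h) ∈ rest) :
    pvRun (h :: rest) = pvRun (rest.erase (!h) ++ [h]) := by
  rw [pvRun]
  simp [hm]

lemma pvRun_cons_not_mem (h : Bool) (rest : List Bool) (hm : (!h) ∉ rest) :
    pvRun (h :: rest) = if h then "Radiant" else "Dire" := by
  rw [pvRun]
  simp [hm]

lemma pvRun_all_true (M : List Bool) (h : ∀ x ∈ M, x = true) (hne : M ≠ []) :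
    pvRun M = "Radiant" := by
  match M with
  | [] => exact absurd rfl hne
  | y :: rest =>
    have hy : y = true := h y List.mem_cons_self
    subst hy
    have hm : (!true) ∉ rest := by
      intro hmem
      simpa using h _ (List.mem_cons_of_mem _ hmem)
    rw [pvRun_cons_not_mem _ _ hm]
    rfl

lemma pvRun_all_false (M : List Bool) (h : ∀ x ∈ M, x = false) (hne : M ≠ []) :
    pvRun M = "Dire" := by
  match M with
  | [] => exact absurd rfl hne
  | y :: rest =>
    have hy : y = false := h y List.mem_cons_self
    subst hy
    have hm : (!false) ∉ rest := by
      intro hmem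
      simpa using h _ (List.mem_cons_of_mem _ hmem)
    rw [pvRun_cons_not_mem _ _ hm]
    rfl

-- the senator who acts moves from the front of the line to the back: same eventual winner
lemma pv_bridge_true (U : List Bool) (d r : Int) (hd : 0 ≤ d) (hr : r ≤ 0) :
    pvRun ((pvDropBF (U ++ [true]) (d + 1) r).1) = pvRun (true :: (pvDropBF U d r).1) := by
  have h1 : (pvDropBF (U ++ [true]) (d + 1) r).1 = (pvDropBF U (d + 1) r).1 ++ [true] := by
    rw [pvDropBF_append]
    have hrL : (pvDropBF U (d + 1) r).2.2 = r := pvDropBF_snd_r _ _ _ hr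
    rw [hrL, pvDropBF_cons_true_nonpos _ _ _ (by omega)]
    rfl
  rw [h1, pvDropBF_succ_d U d r hd hr]
  by_cases hf : false ∈ (pvDropBF U d r).1
  · rw [if_pos hf, pvRun_cons_mem true _ (by simpa using hf)]
    rfl
  · rw [if_neg hf, pvRun_cons_not_mem true _ (by simpa using hf)]
    refine pvRun_all_true _ (fun x hx => ?_) (by simp)
    rcases List.mem_append.mp hx with h2 | h2
    · cases x
      · exact absurd h2 hf
      · rfl
    · simpa using h2

lemma pv_bridge_false (U : List Bool) (d r : Int) (hr : 0 ≤ r) (hd : d ≤ 0) :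
    pvRun ((pvDropBF (U ++ [false]) d (r + 1)).1) = pvRun (false :: (pvDropBF U d r).1) := by
  have h1 : (pvDropBF (U ++ [false]) d (r + 1)).1 = (pvDropBF U d (r + 1)).1 ++ [false] := by
    rw [pvDropBF_append]
    have hdL : (pvDropBF U d (r + 1)).2.1 = d := pvDropBF_snd_d _ _ _ hd
    rw [hdL, pvDropBF_cons_false_nonpos [] d _ (by omega)]
    rfl
  rw [h1, pvDropBF_succ_r U d r hr hd]
  by_cases hf : true ∈ (pvDropBF U d r).1
  · rw [if_pos hf, pvRun_cons_mem false _ (by simpa using hf)]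
    rfl
  · rw [if_neg hf, pvRun_cons_not_mem false _ (by simpa using hf)]
    refine pvRun_all_false _ (fun x hx => ?_) (by simp)
    rcases List.mem_append.mp hx with h2 | h2
    · cases x
      · rfl
      · exact absurd h2 hf
    · simpa using h2


-- component forms of one pvPassS step
lemma pvPassS_skip_R (p : Char) (rest : List Char) (d r : Int) (s : PySem.Set Char)
    (hp : p = 'R') (h0 : r > 0) : pvPassS (p :: rest) d r s = pvPassS rest d (r - 1) s := by
  rw [pvPassS_cons, if_pos hp, if_pos h0]

lemma pvPassS_act_R_1 (p : Char) (rest : List Char) (d r : Int) (s : PySem.Set Char)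
    (hp : p = 'R') (h0 : ¬ r > 0) :
    (pvPassS (p :: rest) d r s).1 = p :: (pvPassS rest (d + 1) r (PySem.Set.add s 'R')).1 := by
  rw [pvPassS_cons, if_pos hp, if_neg h0]

lemma pvPassS_act_R_2 (p : Char) (rest : List Char) (d r : Int) (s : PySem.Set Char)
    (hp : p = 'R') (h0 : ¬ r > 0) :
    (pvPassS (p :: rest) d r s).2 = (pvPassS rest (d + 1) r (PySem.Set.add s 'R')).2 := by
  rw [pvPassS_cons, if_pos hp, if_neg h0]

lemma pvPassS_skip_D (p : Char) (rest : List Char) (d r : Int) (s : PySem.Set Char)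
    (hp : ¬ p = 'R') (h0 : d > 0) : pvPassS (p :: rest) d r s = pvPassS rest (d - 1) r s := by
  rw [pvPassS_cons, if_neg hp, if_pos h0]

lemma pvPassS_act_D_1 (p : Char) (rest : List Char) (d r : Int) (s : PySem.Set Char)
    (hp : ¬ p = 'R') (h0 : ¬ d > 0) :
    (pvPassS (p :: rest) d r s).1 = p :: (pvPassS rest d (r + 1) (PySem.Set.add s 'D')).1 := by
  rw [pvPassS_cons, if_neg hp, if_neg h0]

lemma pvPassS_act_D_2 (p : Char) (rest : List Char) (d r : Int) (s : PySem.Set Char)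
    (hp : ¬ p = 'R') (h0 : ¬ d > 0) :
    (pvPassS (p :: rest) d r s).2 = (pvPassS rest d (r + 1) (PySem.Set.add s 'D')).2 := by
  rw [pvPassS_cons, if_neg hp, if_neg h0]

lemma pvMapR_cons_R (p : Char) (rest : List Char) (hp : p = 'R') :
    pvMapR (p :: rest) = true :: pvMapR rest := by simp [pvMapR, hp]

lemma pvMapR_cons_D (p : Char) (rest : List Char) (hp : ¬ p = 'R') :
    pvMapR (p :: rest) = false :: pvMapR rest := by simp [pvMapR, hp]

-- the party character a senator adds to A's acted-set when he acts
def pvPC (p : Char) : Char := if p = 'R' then 'R' else 'D'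

lemma pv_pass_counters (alive : List Char) (d r : Int) (s : PySem.Set Char)
    (hd : 0 ≤ d) (hr : 0 ≤ r) :
    0 ≤ (pvPassS alive d r s).2.1 ∧ 0 ≤ (pvPassS alive d r s).2.2.1 := by
  induction alive generalizing d r s with
  | nil => exact ⟨hd, hr⟩
  | cons p rest ih =>
    by_cases hp : p = 'R'
    · by_cases h0 : r > 0
      · rw [pvPassS_skip_R p rest d r s hp h0]; exact ih d (r - 1) s hd (by omega)
      · rw [pvPassS_act_R_2 p rest d r s hp h0]; exact ih (d + 1) r _ (by omega) hr
    · by_cases h0 : d > 0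
      · rw [pvPassS_skip_D p rest d r s hp h0]; exact ih (d - 1) r s (by omega) hr
      · rw [pvPassS_act_D_2 p rest d r s hp h0]; exact ih d (r + 1) _ hd (by omega)

lemma pv_pass_sgrow (alive : List Char) (d r : Int) (s : PySem.Set Char) :
    ∀ c ∈ s, c ∈ (pvPassS alive d r s).2.2.2 := by
  induction alive generalizing d r s with
  | nil => intro c hc; exact hc
  | cons p rest ih =>
    intro c hc
    by_cases hp : p = 'R'
    · by_cases h0 : r > 0
      · rw [pvPassS_skip_R p rest d r s hp h0]; exact ih d (r - 1) s c hc
      · rw [pvPassS_act_R_2 p rest d r s hp h0]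
        exact ih (d + 1) r _ c ((PySem.Set.mem_add _ _ _).mpr (Or.inl hc))
    · by_cases h0 : d > 0
      · rw [pvPassS_skip_D p rest d r s hp h0]; exact ih (d - 1) r s c hc
      · rw [pvPassS_act_D_2 p rest d r s hp h0]
        exact ih d (r + 1) _ c ((PySem.Set.mem_add _ _ _).mpr (Or.inl hc))

lemma pv_pass_schars (alive : List Char) (d r : Int) (s : PySem.Set Char) :
    ∀ c ∈ (pvPassS alive d r s).2.2.2, c ∈ s ∨ c = 'R' ∨ c = 'D' := by
  induction alive generalizing d r s with
  | nil => intro c hc; exact Or.inl hc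
  | cons p rest ih =>
    intro c hc
    by_cases hp : p = 'R'
    · by_cases h0 : r > 0
      · rw [pvPassS_skip_R p rest d r s hp h0] at hc; exact ih d (r - 1) s c hc
      · rw [pvPassS_act_R_2 p rest d r s hp h0] at hc
        rcases ih (d + 1) r _ c hc with h | h
        · rcases (PySem.Set.mem_add _ _ _).mp h with h' | h'
          · exact Or.inl h'
          · exact Or.inr (Or.inl h')
        · exact Or.inr h
    · by_cases h0 : d > 0
      · rw [pvPassS_skip_D p rest d r s hp h0] at hc; exact ih (d - 1) r s c hc
      · rw [pvPassS_act_D_2 p rest d r s hp h0] at hc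
        rcases ih d (r + 1) _ c hc with h | h
        · rcases (PySem.Set.mem_add _ _ _).mp h with h' | h'
          · exact Or.inl h'
          · exact Or.inr (Or.inr h')
        · exact Or.inr h

lemma pv_pass_snodup (alive : List Char) (d r : Int) (s : PySem.Set Char) (hs : s.Nodup) :
    (pvPassS alive d r s).2.2.2.Nodup := by
  induction alive generalizing d r s with
  | nil => exact hs
  | cons p rest ih =>
    by_cases hp : p = 'R'
    · by_cases h0 : r > 0
      · rw [pvPassS_skip_R p rest d r s hp h0]; exact ih d (r - 1) s hs
      · rw [pvPassS_act_R_2 p rest d r s hp h0]; exact ih (d + 1) r _ (PySem.Set.nodup_add _ _ hs)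
    · by_cases h0 : d > 0
      · rw [pvPassS_skip_D p rest d r s hp h0]; exact ih (d - 1) r s hs
      · rw [pvPassS_act_D_2 p rest d r s hp h0]; exact ih d (r + 1) _ (PySem.Set.nodup_add _ _ hs)

-- every senator kept by a round acted in it: his party character is in the acted-set
lemma pv_pass_actor_s (alive : List Char) (d r : Int) (s : PySem.Set Char) :
    ∀ q ∈ (pvPassS alive d r s).1, pvPC q ∈ (pvPassS alive d r s).2.2.2 := by
  induction alive generalizing d r s with
  | nil => intro q hq; simp [pvPassS] at hq
  | cons p rest ih =>
    intro q hq
    by_cases hp : p = 'R'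
    · by_cases h0 : r > 0
      · rw [pvPassS_skip_R p rest d r s hp h0] at hq ⊢; exact ih d (r - 1) s q hq
      · rw [pvPassS_act_R_1 p rest d r s hp h0] at hq
        rw [pvPassS_act_R_2 p rest d r s hp h0]
        rcases List.mem_cons.mp hq with h | h
        · subst h
          exact pv_pass_sgrow rest (d + 1) r _ (pvPC q)
            ((PySem.Set.mem_add _ _ _).mpr (Or.inr (by simp [pvPC, hp])))
        · exact ih (d + 1) r _ q h
    · by_cases h0 : d > 0
      · rw [pvPassS_skip_D p rest d r s hp h0] at hq ⊢; exact ih (d - 1) r s q hq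
      · rw [pvPassS_act_D_1 p rest d r s hp h0] at hq
        rw [pvPassS_act_D_2 p rest d r s hp h0]
        rcases List.mem_cons.mp hq with h | h
        · subst h
          exact pv_pass_sgrow rest d (r + 1) _ (pvPC q)
            ((PySem.Set.mem_add _ _ _).mpr (Or.inr (by simp [pvPC, hp])))
        · exact ih d (r + 1) _ q h

-- conversely, everything in the acted-set is some kept senator's party (or was already there)
lemma pv_pass_s_actor (alive : List Char) (d r : Int) (s : PySem.Set Char) :
    ∀ c ∈ (pvPassS alive d r s).2.2.2,
      c ∈ s ∨ ∃ q ∈ (pvPassS alive d r s).1, c = pvPC q := by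
  induction alive generalizing d r s with
  | nil => intro c hc; exact Or.inl hc
  | cons p rest ih =>
    intro c hc
    by_cases hp : p = 'R'
    · by_cases h0 : r > 0
      · rw [pvPassS_skip_R p rest d r s hp h0] at hc ⊢; exact ih d (r - 1) s c hc
      · rw [pvPassS_act_R_2 p rest d r s hp h0] at hc
        rw [pvPassS_act_R_1 p rest d r s hp h0]
        rcases ih (d + 1) r _ c hc with h | ⟨q, hq1, hq2⟩
        · rcases (PySem.Set.mem_add _ _ _).mp h with h' | h'
          · exact Or.inl h'
          · exact Or.inr ⟨p, List.mem_cons_self, by simp [pvPC, hp, h']⟩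
        · exact Or.inr ⟨q, List.mem_cons_of_mem _ hq1, hq2⟩
    · by_cases h0 : d > 0
      · rw [pvPassS_skip_D p rest d r s hp h0] at hc ⊢; exact ih (d - 1) r s c hc
      · rw [pvPassS_act_D_2 p rest d r s hp h0] at hc
        rw [pvPassS_act_D_1 p rest d r s hp h0]
        rcases ih d (r + 1) _ c hc with h | ⟨q, hq1, hq2⟩
        · rcases (PySem.Set.mem_add _ _ _).mp h with h' | h'
          · exact Or.inl h'
          · exact Or.inr ⟨p, List.mem_cons_self, by simp [pvPC, hp, h']⟩
        · exact Or.inr ⟨q, List.mem_cons_of_mem _ hq1, hq2⟩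

-- a kept senator's party is present in the eagerly-banned line
lemma pv_pass_actor_present (alive : List Char) (d r : Int) (s : PySem.Set Char)
    (hd : 0 ≤ d) (hr : 0 ≤ r) :
    ∀ q ∈ (pvPassS alive d r s).1, ((q == 'R') : Bool) ∈ (pvDropBF (pvMapR alive) d r).1 := by
  induction alive generalizing d r s with
  | nil => intro q hq; simp [pvPassS] at hq
  | cons p rest ih =>
    intro q hq
    by_cases hp : p = 'R'
    · by_cases h0 : r > 0
      · rw [pvPassS_skip_R p rest d r s hp h0] at hq
        rw [pvMapR_cons_R p rest hp, pvDropBF_cons_true_pos _ _ _ h0]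
        exact ih d (r - 1) s hd (by omega) q hq
      · rw [pvPassS_act_R_1 p rest d r s hp h0] at hq
        rw [pvMapR_cons_R p rest hp, pvDropBF_cons_true_nonpos _ _ _ h0]
        rcases List.mem_cons.mp hq with h | h
        · subst h; simp [hp]
        · have hmem := ih (d + 1) r _ (by omega) hr q h
          rw [pvDropBF_succ_d (pvMapR rest) d r hd (by omega)] at hmem
          by_cases hf : false ∈ (pvDropBF (pvMapR rest) d r).1
          · rw [if_pos hf] at hmem
            exact List.mem_cons_of_mem _ (List.mem_of_mem_erase hmem)
          · rw [if_neg hf] at hmem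
            exact List.mem_cons_of_mem _ hmem
    · by_cases h0 : d > 0
      · rw [pvPassS_skip_D p rest d r s hp h0] at hq
        rw [pvMapR_cons_D p rest hp, pvDropBF_cons_false_pos _ _ _ h0]
        exact ih (d - 1) r s (by omega) hr q hq
      · rw [pvPassS_act_D_1 p rest d r s hp h0] at hq
        rw [pvMapR_cons_D p rest hp, pvDropBF_cons_false_nonpos _ _ _ h0]
        rcases List.mem_cons.mp hq with h | h
        · subst h; simp [hp]
        · have hmem := ih d (r + 1) _ hd (by omega) q h
          rw [pvDropBF_succ_r (pvMapR rest) d r hr (by omega)] at hmem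
          by_cases hf : true ∈ (pvDropBF (pvMapR rest) d r).1
          · rw [if_pos hf] at hmem
            exact List.mem_cons_of_mem _ (List.mem_of_mem_erase hmem)
          · rw [if_neg hf] at hmem
            exact List.mem_cons_of_mem _ hmem

-- if anyone survives the eager bans, someone acts this round
lemma pv_pass_nonempty (alive : List Char) (d r : Int) (s : PySem.Set Char)
    (hne : (pvDropBF (pvMapR alive) d r).1 ≠ []) : (pvPassS alive d r s).1 ≠ [] := by
  induction alive generalizing d r s with
  | nil => simp [pvMapR, pvDropBF] at hne
  | cons p rest ih =>
    by_cases hp : p = 'R'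
    · by_cases h0 : r > 0
      · rw [pvMapR_cons_R p rest hp, pvDropBF_cons_true_pos _ _ _ h0] at hne
        rw [pvPassS_skip_R p rest d r s hp h0]
        exact ih d (r - 1) s hne
      · rw [pvPassS_act_R_1 p rest d r s hp h0]; simp
    · by_cases h0 : d > 0
      · rw [pvMapR_cons_D p rest hp, pvDropBF_cons_false_pos _ _ _ h0] at hne
        rw [pvPassS_skip_D p rest d r s hp h0]
        exact ih (d - 1) r s hne
      · rw [pvPassS_act_D_1 p rest d r s hp h0]; simp

-- THE simulation invariant: one round of counter-banning preserves the event-driven winner.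
-- Q abstracts the earlier survivors of the current round, sitting behind the remaining line.
lemma pv_pass_inv (alive : List Char) : ∀ (d r : Int) (s : PySem.Set Char) (Q : List Bool),
    0 ≤ d → 0 ≤ r →
    pvRun ((pvDropBF (Q ++ pvMapR (pvPassS alive d r s).1)
        (pvPassS alive d r s).2.1 (pvPassS alive d r s).2.2.1).1) =
      pvRun ((pvDropBF (pvMapR alive ++ Q) d r).1) := by
  induction alive with
  | nil => intro d r s Q hd hr; simp [pvPassS, pvMapR]
  | cons p rest ih =>
    intro d r s Q hd hr
    by_cases hp : p = 'R'
    · by_cases h0 : r > 0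
      · rw [pvPassS_skip_R p rest d r s hp h0, pvMapR_cons_R p rest hp, List.cons_append,
          pvDropBF_cons_true_pos _ _ _ h0]
        exact ih d (r - 1) s Q hd (by omega)
      · rw [pvPassS_act_R_1 p rest d r s hp h0, pvPassS_act_R_2 p rest d r s hp h0]
        have e1 : Q ++ pvMapR (p :: (pvPassS rest (d + 1) r (PySem.Set.add s 'R')).1) =
            (Q ++ [true]) ++ pvMapR (pvPassS rest (d + 1) r (PySem.Set.add s 'R')).1 := by
          simp [pvMapR, hp]
        rw [e1, ih (d + 1) r (PySem.Set.add s 'R') (Q ++ [true]) (by omega) hr,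
          pvMapR_cons_R p rest hp, List.cons_append, pvDropBF_cons_true_nonpos _ _ _ h0,
          ← List.append_assoc]
        exact pv_bridge_true (pvMapR rest ++ Q) d r hd (by omega)
    · by_cases h0 : d > 0
      · rw [pvPassS_skip_D p rest d r s hp h0, pvMapR_cons_D p rest hp, List.cons_append,
          pvDropBF_cons_false_pos _ _ _ h0]
        exact ih (d - 1) r s Q (by omega) hr
      · rw [pvPassS_act_D_1 p rest d r s hp h0, pvPassS_act_D_2 p rest d r s hp h0]
        have e1 : Q ++ pvMapR (p :: (pvPassS rest d (r + 1) (PySem.Set.add s 'D')).1) =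
            (Q ++ [false]) ++ pvMapR (pvPassS rest d (r + 1) (PySem.Set.add s 'D')).1 := by
          simp [pvMapR, hp]
        rw [e1, ih d (r + 1) (PySem.Set.add s 'D') (Q ++ [false]) hd (by omega),
          pvMapR_cons_D p rest hp, List.cons_append, pvDropBF_cons_false_nonpos _ _ _ h0,
          ← List.append_assoc]
        exact pv_bridge_false (pvMapR rest ++ Q) d r hr (by omega)

-- the line of surviving senators never becomes empty during a round
lemma pv_pass_abs_ne (alive : List Char) : ∀ (d r : Int) (s : PySem.Set Char) (Q : List Bool),
    0 ≤ d → 0 ≤ r →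
    (pvDropBF (pvMapR alive ++ Q) d r).1 ≠ [] →
    (pvDropBF (Q ++ pvMapR (pvPassS alive d r s).1)
        (pvPassS alive d r s).2.1 (pvPassS alive d r s).2.2.1).1 ≠ [] := by
  induction alive with
  | nil => intro d r s Q hd hr hne; simpa [pvPassS, pvMapR] using hne
  | cons p rest ih =>
    intro d r s Q hd hr hne
    by_cases hp : p = 'R'
    · by_cases h0 : r > 0
      · rw [pvMapR_cons_R p rest hp, List.cons_append, pvDropBF_cons_true_pos _ _ _ h0] at hne
        rw [pvPassS_skip_R p rest d r s hp h0]
        exact ih d (r - 1) s Q hd (by omega) hne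
      · rw [pvPassS_act_R_1 p rest d r s hp h0, pvPassS_act_R_2 p rest d r s hp h0]
        have e1 : Q ++ pvMapR (p :: (pvPassS rest (d + 1) r (PySem.Set.add s 'R')).1) =
            (Q ++ [true]) ++ pvMapR (pvPassS rest (d + 1) r (PySem.Set.add s 'R')).1 := by
          simp [pvMapR, hp]
        rw [e1]
        refine ih (d + 1) r (PySem.Set.add s 'R') (Q ++ [true]) (by omega) hr ?_
        rw [← List.append_assoc, pvDropBF_append,
          pvDropBF_snd_r (pvMapR rest ++ Q) (d + 1) r (by omega),
          pvDropBF_cons_true_nonpos _ _ _ h0]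
        simp
    · by_cases h0 : d > 0
      · rw [pvMapR_cons_D p rest hp, List.cons_append, pvDropBF_cons_false_pos _ _ _ h0] at hne
        rw [pvPassS_skip_D p rest d r s hp h0]
        exact ih (d - 1) r s Q (by omega) hr hne
      · rw [pvPassS_act_D_1 p rest d r s hp h0, pvPassS_act_D_2 p rest d r s hp h0]
        have e1 : Q ++ pvMapR (p :: (pvPassS rest d (r + 1) (PySem.Set.add s 'D')).1) =
            (Q ++ [false]) ++ pvMapR (pvPassS rest d (r + 1) (PySem.Set.add s 'D')).1 := by
          simp [pvMapR, hp]
        rw [e1]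
        refine ih d (r + 1) (PySem.Set.add s 'D') (Q ++ [false]) hd (by omega) ?_
        rw [← List.append_assoc, pvDropBF_append,
          pvDropBF_snd_d (pvMapR rest ++ Q) d (r + 1) (by omega),
          pvDropBF_cons_false_nonpos _ _ _ h0]
        simp

-- the line never grows over a round …
lemma pv_pass_len_le (alive : List Char) : ∀ (d r : Int) (s : PySem.Set Char) (Q : List Bool),
    0 ≤ d → 0 ≤ r →
    (pvDropBF (Q ++ pvMapR (pvPassS alive d r s).1)
        (pvPassS alive d r s).2.1 (pvPassS alive d r s).2.2.1).1.length ≤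
      (pvDropBF (pvMapR alive ++ Q) d r).1.length := by
  induction alive with
  | nil => intro d r s Q hd hr; simp [pvPassS, pvMapR]
  | cons p rest ih =>
    intro d r s Q hd hr
    by_cases hp : p = 'R'
    · by_cases h0 : r > 0
      · rw [pvPassS_skip_R p rest d r s hp h0, pvMapR_cons_R p rest hp, List.cons_append,
          pvDropBF_cons_true_pos _ _ _ h0]
        exact ih d (r - 1) s Q hd (by omega)
      · rw [pvPassS_act_R_1 p rest d r s hp h0, pvPassS_act_R_2 p rest d r s hp h0,
          pvMapR_cons_R p rest hp, List.cons_append, pvDropBF_cons_true_nonpos _ _ _ h0]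
        have e1 : Q ++ pvMapR (p :: (pvPassS rest (d + 1) r (PySem.Set.add s 'R')).1) =
            (Q ++ [true]) ++ pvMapR (pvPassS rest (d + 1) r (PySem.Set.add s 'R')).1 := by
          simp [pvMapR, hp]
        rw [e1]
        refine le_trans (ih (d + 1) r (PySem.Set.add s 'R') (Q ++ [true]) (by omega) hr) ?_
        rw [← List.append_assoc, pvDropBF_append,
          pvDropBF_snd_r (pvMapR rest ++ Q) (d + 1) r (by omega),
          pvDropBF_cons_true_nonpos _ _ _ h0,
          pvDropBF_succ_d (pvMapR rest ++ Q) d r hd (by omega)]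
        by_cases hf : false ∈ (pvDropBF (pvMapR rest ++ Q) d r).1
        · rw [if_pos hf]
          simp [List.length_erase_of_mem hf, pvDropBF]
        · rw [if_neg hf]
          simp [pvDropBF]
    · by_cases h0 : d > 0
      · rw [pvPassS_skip_D p rest d r s hp h0, pvMapR_cons_D p rest hp, List.cons_append,
          pvDropBF_cons_false_pos _ _ _ h0]
        exact ih (d - 1) r s Q (by omega) hr
      · rw [pvPassS_act_D_1 p rest d r s hp h0, pvPassS_act_D_2 p rest d r s hp h0,
          pvMapR_cons_D p rest hp, List.cons_append, pvDropBF_cons_false_nonpos _ _ _ h0]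
        have e1 : Q ++ pvMapR (p :: (pvPassS rest d (r + 1) (PySem.Set.add s 'D')).1) =
            (Q ++ [false]) ++ pvMapR (pvPassS rest d (r + 1) (PySem.Set.add s 'D')).1 := by
          simp [pvMapR, hp]
        rw [e1]
        refine le_trans (ih d (r + 1) (PySem.Set.add s 'D') (Q ++ [false]) hd (by omega)) ?_
        rw [← List.append_assoc, pvDropBF_append,
          pvDropBF_snd_d (pvMapR rest ++ Q) d (r + 1) (by omega),
          pvDropBF_cons_false_nonpos _ _ _ h0,
          pvDropBF_succ_r (pvMapR rest ++ Q) d r hr (by omega)]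
        by_cases hf : true ∈ (pvDropBF (pvMapR rest ++ Q) d r).1
        · rw [if_pos hf]
          simp [List.length_erase_of_mem hf, pvDropBF]
        · rw [if_neg hf]
          simp [pvDropBF]

-- … and strictly shrinks while both parties are still in it
lemma pv_pass_len_lt (alive : List Char) : ∀ (d r : Int) (s : PySem.Set Char) (Q : List Bool),
    0 ≤ d → 0 ≤ r →
    (pvDropBF (pvMapR alive) d r).1 ≠ [] →
    true ∈ (pvDropBF (pvMapR alive ++ Q) d r).1 →
    false ∈ (pvDropBF (pvMapR alive ++ Q) d r).1 →
    (pvDropBF (Q ++ pvMapR (pvPassS alive d r s).1)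
        (pvPassS alive d r s).2.1 (pvPassS alive d r s).2.2.1).1.length <
      (pvDropBF (pvMapR alive ++ Q) d r).1.length := by
  induction alive with
  | nil => intro d r s Q hd hr hne ht hf; simp [pvMapR, pvDropBF] at hne
  | cons p rest ih =>
    intro d r s Q hd hr hne ht hf
    by_cases hp : p = 'R'
    · by_cases h0 : r > 0
      · rw [pvMapR_cons_R p rest hp, pvDropBF_cons_true_pos _ _ _ h0] at hne
        rw [pvMapR_cons_R p rest hp, List.cons_append, pvDropBF_cons_true_pos _ _ _ h0] at ht hf ⊢
        rw [pvPassS_skip_R p rest d r s hp h0]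
        exact ih d (r - 1) s Q hd (by omega) hne ht hf
      · rw [pvPassS_act_R_1 p rest d r s hp h0, pvPassS_act_R_2 p rest d r s hp h0]
        rw [pvMapR_cons_R p rest hp, List.cons_append, pvDropBF_cons_true_nonpos _ _ _ h0] at hf ⊢
        have hfV : false ∈ (pvDropBF (pvMapR rest ++ Q) d r).1 := by
          rcases List.mem_cons.mp hf with h | h
          · exact absurd h.symm (by simp)
          · exact h
        have e1 : Q ++ pvMapR (p :: (pvPassS rest (d + 1) r (PySem.Set.add s 'R')).1) =
            (Q ++ [true]) ++ pvMapR (pvPassS rest (d + 1) r (PySem.Set.add s 'R')).1 := by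
          simp [pvMapR, hp]
        rw [e1]
        refine lt_of_le_of_lt (pv_pass_len_le rest (d + 1) r (PySem.Set.add s 'R')
          (Q ++ [true]) (by omega) hr) ?_
        rw [← List.append_assoc, pvDropBF_append,
          pvDropBF_snd_r (pvMapR rest ++ Q) (d + 1) r (by omega),
          pvDropBF_cons_true_nonpos _ _ _ h0,
          pvDropBF_succ_d (pvMapR rest ++ Q) d r hd (by omega), if_pos hfV]
        simp [List.length_erase_of_mem hfV, pvDropBF]
        exact List.length_pos_of_mem hfV
    · by_cases h0 : d > 0
      · rw [pvMapR_cons_D p rest hp, pvDropBF_cons_false_pos _ _ _ h0] at hne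
        rw [pvMapR_cons_D p rest hp, List.cons_append, pvDropBF_cons_false_pos _ _ _ h0] at ht hf ⊢
        rw [pvPassS_skip_D p rest d r s hp h0]
        exact ih (d - 1) r s Q (by omega) hr hne ht hf
      · rw [pvPassS_act_D_1 p rest d r s hp h0, pvPassS_act_D_2 p rest d r s hp h0]
        rw [pvMapR_cons_D p rest hp, List.cons_append, pvDropBF_cons_false_nonpos _ _ _ h0] at ht ⊢
        have htV : true ∈ (pvDropBF (pvMapR rest ++ Q) d r).1 := by
          rcases List.mem_cons.mp ht with h | h
          · exact absurd h.symm (by simp)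
          · exact h
        have e1 : Q ++ pvMapR (p :: (pvPassS rest d (r + 1) (PySem.Set.add s 'D')).1) =
            (Q ++ [false]) ++ pvMapR (pvPassS rest d (r + 1) (PySem.Set.add s 'D')).1 := by
          simp [pvMapR, hp]
        rw [e1]
        refine lt_of_le_of_lt (pv_pass_len_le rest d (r + 1) (PySem.Set.add s 'D')
          (Q ++ [false]) hd (by omega)) ?_
        rw [← List.append_assoc, pvDropBF_append,
          pvDropBF_snd_d (pvMapR rest ++ Q) d (r + 1) (by omega),
          pvDropBF_cons_false_nonpos _ _ _ h0,
          pvDropBF_succ_r (pvMapR rest ++ Q) d r hr (by omega), if_pos htV]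
        simp [List.length_erase_of_mem htV, pvDropBF]
        exact List.length_pos_of_mem htV

lemma pvLoopS_succ (f : Nat) (alive : List Char) (d r : Int) (s : PySem.Set Char) :
    pvLoopS (f + 1) alive d r s =
      if s.length = 1 then s
      else pvLoopS f (pvPassS alive d r PySem.Set.empty).1
        (pvPassS alive d r PySem.Set.empty).2.1
        (pvPassS alive d r PySem.Set.empty).2.2.1
        (pvPassS alive d r PySem.Set.empty).2.2.2 := rfl

-- A's whole while-loop, against the event-driven winner of the current eagerly-banned line
lemma pv_loop_main (fuel : Nat) : ∀ (alive : List Char) (d r : Int) (s : PySem.Set Char),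
    0 ≤ d → 0 ≤ r →
    (pvDropBF (pvMapR alive) d r).1 ≠ [] →
    (s.length = 1 →
      (s.head? = some 'R' ∧ ∀ x ∈ (pvDropBF (pvMapR alive) d r).1, x = true) ∨
      (s.head? = some 'D' ∧ ∀ x ∈ (pvDropBF (pvMapR alive) d r).1, x = false)) →
    (pvDropBF (pvMapR alive) d r).1.length + 2 ≤ fuel →
    (if (pvLoopS fuel alive d r s).head? = some 'R' then "Radiant" else "Dire") =
      pvRun ((pvDropBF (pvMapR alive) d r).1) := by
  induction fuel with
  | zero => intro alive d r s hd hr hne hmatch hfuel; omega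
  | succ f ih =>
    intro alive d r s hd hr hne hmatch hfuel
    rw [pvLoopS_succ f alive d r s]
    by_cases hs : s.length = 1
    · rw [if_pos hs]
      rcases hmatch hs with ⟨h1, h2⟩ | ⟨h1, h2⟩
      · rw [if_pos h1]
        exact (pvRun_all_true _ h2 hne).symm
      · rw [if_neg (by simp [h1])]
        exact (pvRun_all_false _ h2 hne).symm
    · rw [if_neg hs]
      have hc := pv_pass_counters alive d r PySem.Set.empty hd hr
      have hinv := pv_pass_inv alive d r PySem.Set.empty [] hd hr
      rw [List.nil_append, List.append_nil] at hinv
      rw [← hinv]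
      have habs' : (pvDropBF (pvMapR (pvPassS alive d r PySem.Set.empty).1)
          (pvPassS alive d r PySem.Set.empty).2.1
          (pvPassS alive d r PySem.Set.empty).2.2.1).1 ≠ [] := by
        have h := pv_pass_abs_ne alive d r PySem.Set.empty [] hd hr (by rwa [List.append_nil])
        rwa [List.nil_append] at h
      have hnxt : (pvPassS alive d r PySem.Set.empty).1 ≠ [] :=
        pv_pass_nonempty alive d r PySem.Set.empty hne
      have hs'chars : ∀ c ∈ (pvPassS alive d r PySem.Set.empty).2.2.2, c = 'R' ∨ c = 'D' := by
        intro c hcm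
        rcases pv_pass_schars alive d r PySem.Set.empty c hcm with h | h
        · simp [PySem.Set.empty] at h
        · exact h
      have hs'ne : (pvPassS alive d r PySem.Set.empty).2.2.2 ≠ [] := by
        obtain ⟨q, l, hlist2⟩ := List.exists_cons_of_ne_nil hnxt
        exact List.ne_nil_of_mem (pv_pass_actor_s alive d r PySem.Set.empty q
          (by rw [hlist2]; exact List.mem_cons_self))
      by_cases hs1 : (pvPassS alive d r PySem.Set.empty).2.2.2.length = 1
      · -- the next round will exit immediately with the acted-set of this round
        have hposabs : 0 < (pvDropBF (pvMapR alive) d r).1.length :=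
          List.length_pos_of_ne_nil hne
        cases f with
        | zero => omega
        | succ f2 =>
          rw [pvLoopS_succ f2, if_pos hs1]
          obtain ⟨c, l, hc1⟩ := List.exists_cons_of_ne_nil hs'ne
          have hl : l = [] := by
            rw [hc1] at hs1
            cases l with
            | nil => rfl
            | cons b l2 => simp at hs1
          rw [hl] at hc1
          have hcRD : c = 'R' ∨ c = 'D' :=
            hs'chars c (by rw [hc1]; exact List.mem_cons_self)
          have hhomo : ∀ x ∈ (pvDropBF (pvMapR (pvPassS alive d r PySem.Set.empty).1)
              (pvPassS alive d r PySem.Set.empty).2.1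
              (pvPassS alive d r PySem.Set.empty).2.2.1).1, x = (c == 'R') := by
            intro x hx
            obtain ⟨q, hq1, hq2⟩ := List.mem_map.mp
              (by simpa [pvMapR] using pvDropBF_subset _ _ _ x hx)
            have hmem := pv_pass_actor_s alive d r PySem.Set.empty q hq1
            rw [hc1, List.mem_singleton] at hmem
            by_cases hqR : q = 'R'
            · have hcR : c = 'R' := by rw [← hmem]; simp [pvPC, hqR]
              rw [← hq2, hcR]
              simp [hqR]
            · have hcD : c = 'D' := by rw [← hmem]; simp [pvPC, hqR]
              rw [← hq2, hcD]
              simp [hqR]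
          rw [hc1]
          rcases hcRD with hcR | hcD
          · subst hcR
            rw [if_pos (by simp)]
            refine (pvRun_all_true _ (fun x hx => ?_) habs').symm
            have := hhomo x hx
            simpa using this
          · subst hcD
            rw [if_neg (by simp)]
            refine (pvRun_all_false _ (fun x hx => ?_) habs').symm
            have := hhomo x hx
            simpa using this
      · -- both parties still in the line: it strictly shrinks, recurse
        have hlen0 : (pvPassS alive d r PySem.Set.empty).2.2.2.length ≠ 0 := by
          simpa using hs'ne
        have hlen2 : 2 ≤ (pvPassS alive d r PySem.Set.empty).2.2.2.length := by omega
        have hnd : (pvPassS alive d r PySem.Set.empty).2.2.2.Nodup :=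
          pv_pass_snodup alive d r PySem.Set.empty (by simp [PySem.Set.empty])
        obtain ⟨a, l, hlist3⟩ := List.exists_cons_of_ne_nil hs'ne
        have hlne : l ≠ [] := by
          intro hh
          rw [hlist3, hh] at hs1
          simp at hs1
        obtain ⟨b, l2, hlist4⟩ := List.exists_cons_of_ne_nil hlne
        rw [hlist4] at hlist3
        have hab : a ≠ b := by
          rw [hlist3] at hnd
          intro hh
          exact (List.nodup_cons.mp hnd).1 (by rw [hh]; exact List.mem_cons_self)
        have haRD : a = 'R' ∨ a = 'D' :=
          hs'chars a (by rw [hlist3]; exact List.mem_cons_self)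
        have hbRD : b = 'R' ∨ b = 'D' :=
          hs'chars b (by rw [hlist3]; exact List.mem_cons_of_mem _ List.mem_cons_self)
        have hboth : 'R' ∈ (pvPassS alive d r PySem.Set.empty).2.2.2 ∧
            'D' ∈ (pvPassS alive d r PySem.Set.empty).2.2.2 := by
          rcases haRD with h1 | h1 <;> rcases hbRD with h2 | h2
          · exact absurd (h1.trans h2.symm) hab
          · exact ⟨by rw [hlist3, ← h1]; exact List.mem_cons_self,
              by rw [hlist3, ← h2]; exact List.mem_cons_of_mem _ List.mem_cons_self⟩
          · exact ⟨by rw [hlist3, ← h2]; exact List.mem_cons_of_mem _ List.mem_cons_self,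
              by rw [hlist3, ← h1]; exact List.mem_cons_self⟩
          · exact absurd (h1.trans h2.symm) hab
        have hpartyR : true ∈ (pvDropBF (pvMapR alive) d r).1 := by
          rcases pv_pass_s_actor alive d r PySem.Set.empty 'R' hboth.1 with h | ⟨q, hq1, hq2⟩
          · simp [PySem.Set.empty] at h
          · have hqR : q = 'R' := by
              by_contra hh
              rw [show pvPC q = 'D' from by simp [pvPC, hh]] at hq2
              exact absurd hq2 (by decide)
            have hp := pv_pass_actor_present alive d r PySem.Set.empty hd hr q hq1
            rwa [show ((q == 'R') : Bool) = true from by simp [hqR]] at hp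
        have hpartyD : false ∈ (pvDropBF (pvMapR alive) d r).1 := by
          rcases pv_pass_s_actor alive d r PySem.Set.empty 'D' hboth.2 with h | ⟨q, hq1, hq2⟩
          · simp [PySem.Set.empty] at h
          · have hqD : ¬ q = 'R' := by
              intro hh
              rw [show pvPC q = 'R' from by simp [pvPC, hh]] at hq2
              exact absurd hq2 (by decide)
            have hp := pv_pass_actor_present alive d r PySem.Set.empty hd hr q hq1
            rwa [show ((q == 'R') : Bool) = false from by simp [hqD]] at hp
        have hlt := pv_pass_len_lt alive d r PySem.Set.empty [] hd hr hne
          (by rwa [List.append_nil]) (by rwa [List.append_nil])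
        rw [List.nil_append, List.append_nil] at hlt
        exact ih (pvPassS alive d r PySem.Set.empty).1 (pvPassS alive d r PySem.Set.empty).2.1
          (pvPassS alive d r PySem.Set.empty).2.2.1 (pvPassS alive d r PySem.Set.empty).2.2.2
          hc.1 hc.2 habs' (fun hh => absurd hh hs1) (by omega)

-- ===== VERDICT (by name: the statement is the Claim_ definition above) =====
theorem predictPartyVictory_spec : Claim_equal_predictPartyVictory := by
  unfold Claim_equal_predictPartyVictory
  intro senate _ hpre
  unfold Spec_predictPartyVictory
  have hcs : senate.toList ≠ [] := by
    intro h
    exact hpre (String.toList_inj.mp (by rw [h]; rfl))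
  rw [pvA_eq_S]
  have habs : (pvDropBF (pvMapR senate.toList) 0 0).1 ≠ [] := by
    rw [pvDropBF_zero]
    simpa [pvMapR] using hcs
  have h := pv_loop_main (senate.toList.length + 2) senate.toList 0 0 PySem.Set.empty
    le_rfl le_rfl habs (fun hh => by simp [PySem.Set.empty] at hh)
    (by rw [pvDropBF_zero]; simp [pvMapR])
  rw [pvDropBF_zero] at h
  rw [h]
  rfl
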